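-- pv_equiv track=rewrite | github.com/TeamOfWeekend/py_algorithm | py_algorithm/myapp/algo_binary_watch.py | getHourByNum
-- ===== SOURCE A (Python) =====
-- def getHourByNum(num):
--     base_hours = [1, 2, 4, 8]
--     res_hours = []
--
--     if (num < 1) or (num > 3):
--         return None
--     elif 1 == num:
--         res_hours = base_hours[:]
--     elif 2 == num:
--         for i in range(0, len(base_hours)):
--             for j in range(i+1, len(base_hours)):
--                 hour_calc = base_hours[i] + base_hours[j]
--                 if hour_calc > 12:
--                     continue
--                 res_hours.append(hour_calc)
--     elif 3 == num:
--         for i in range(0, len(base_hours)):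
--             for j in range(i+1, len(base_hours)):
--                 for k in range(j+1, len(base_hours)):
--                     hour_calc = base_hours[i] + base_hours[j] + base_hours[k]
--                     if hour_calc > 12:
--                         continue
--                     res_hours.append(hour_calc)
--
--     return res_hours
-- ===== SOURCE B (Python) =====
-- def _combs(xs, k):
--     # all k-element subsets of xs, in lexicographic (index) order
--     if k == 0:
--         return [[]]
--     if not xs:
--         return []
--     head, tail = xs[0], xs[1:]
--     return [[head] + c for c in _combs(tail, k - 1)] + _combs(tail, k)
--
--
-- def getHourByNum(num):
--     if num < 1 or num > 3:
--         return None
--     return [s for s in map(sum, _combs([1, 2, 4, 8], num)) if s <= 12]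
-- ===== Notes on version B (the rewrite author's own statement) =====
-- stated objective: simpler
-- what changed: Replaces the three hardcoded branches (copy, double loop, triple loop) with one generic recursive k-combinations enumeration followed by a sum-and-filter pass.
import Mathlib
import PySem

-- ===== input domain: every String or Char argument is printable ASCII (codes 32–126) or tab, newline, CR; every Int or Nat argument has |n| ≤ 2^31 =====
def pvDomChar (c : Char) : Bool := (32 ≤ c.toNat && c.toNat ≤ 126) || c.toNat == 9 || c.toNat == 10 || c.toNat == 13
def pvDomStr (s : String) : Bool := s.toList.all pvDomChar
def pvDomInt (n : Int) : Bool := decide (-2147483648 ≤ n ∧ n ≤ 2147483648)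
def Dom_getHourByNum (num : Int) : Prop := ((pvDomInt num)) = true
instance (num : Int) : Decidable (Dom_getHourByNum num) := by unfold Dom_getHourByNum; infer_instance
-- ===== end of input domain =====

-- B replaces A's three hardcoded branches with one generic recursive k-combinations
-- enumeration plus a sum-and-filter pass; objective: simpler.


-- ===== PORT A =====
def getHourByNum (num : Int) : Option (List Int) :=
  let base_hours : List Int := [1, 2, 4, 8]
  if num < 1 ∨ num > 3 then
    none
  else if num = 1 then
    some base_hours
  else if num = 2 then
    some ((PySem.List.pyRange 0 (PySem.List.len base_hours) 1).foldl (fun acc i =>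
      (PySem.List.pyRange (i + 1) (PySem.List.len base_hours) 1).foldl (fun acc j =>
        let hour_calc := PySem.List.pyGetD base_hours i 0 + PySem.List.pyGetD base_hours j 0
        if hour_calc > 12 then acc else acc ++ [hour_calc]) acc) [])
  else if num = 3 then
    some ((PySem.List.pyRange 0 (PySem.List.len base_hours) 1).foldl (fun acc i =>
      (PySem.List.pyRange (i + 1) (PySem.List.len base_hours) 1).foldl (fun acc j =>
        (PySem.List.pyRange (j + 1) (PySem.List.len base_hours) 1).foldl (fun acc k =>
          let hour_calc := PySem.List.pyGetD base_hours i 0 + PySem.List.pyGetD base_hours j 0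
            + PySem.List.pyGetD base_hours k 0
          if hour_calc > 12 then acc else acc ++ [hour_calc]) acc) acc) [])
  else
    some []  -- Python's fall-through `return res_hours`; unreachable given the guard

-- ===== PORT B =====
-- all k-element subsets of xs, in lexicographic (index) order  (port of _combs)
def pvCombs (xs : List Int) (k : Int) : List (List Int) :=
  if k = 0 then [[]]
  else
    match xs with
    | [] => []
    | head :: tail => (pvCombs tail (k - 1)).map (fun c => head :: c) ++ pvCombs tail k

def getHourByNum_alt (num : Int) : Option (List Int) :=
  if num < 1 ∨ num > 3 then none
  else some (((pvCombs [1, 2, 4, 8] num).map List.sum).filter (fun s => decide (s ≤ 12)))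

-- ===== PRECONDITION & SPEC =====
def Spec_getHourByNum (num : Int) (out : Option (List Int)) : Prop := out = getHourByNum_alt num
instance (num : Int) (out : Option (List Int)) : Decidable (Spec_getHourByNum num out) := by unfold Spec_getHourByNum; infer_instance

-- ===== CLAIM (what is proved, stated in full; the proofs are below) =====
def Claim_equal_getHourByNum : Prop := ∀ (num : Int), Dom_getHourByNum num → Spec_getHourByNum num (getHourByNum num)

-- ===== LEMMAS AND PROOFS =====

-- ===== VERDICT (by name: the statement is the Claim_ definition above) =====
theorem getHourByNum_spec : Claim_equal_getHourByNum := by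
  intro num _
  unfold Spec_getHourByNum
  by_cases h : num < 1 ∨ num > 3
  · simp [getHourByNum, getHourByNum_alt, h]
  · have h13 : num = 1 ∨ num = 2 ∨ num = 3 := by omega
    rcases h13 with rfl | rfl | rfl <;> decide
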